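-- pv_equiv track=rewrite | github.com/ankurs287/CP-Problems-Solutions | a3.py | compare_distr
-- ===== SOURCE A (Python) =====
-- def compare_distr(L1,L2,bin):
-- 	L1.sort()
-- 	L2.sort()
-- 	i,j,f1,k=0,L1[0],[0],0
-- 	while(i<len(L1)):
-- 		if j<=L1[i]<j+bin:
-- 			f1[k]+=1
-- 			i=i+1
-- 		else:
-- 			j=j+bin
-- 			f1.append(0)
-- 			k+=1
-- 	i,j,f2,k=0,L2[0],[0],0
-- 	while(i<len(L2)):
-- 		if j<=L2[i]<j+bin:
-- 			f2[k]+=1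
-- 			i=i+1
-- 		else:
-- 			j=j+bin
-- 			f2.append(0)
-- 			k+=1
-- 	if(f1==f2):
-- 		return True
-- 	else:
-- 		return False
-- ===== SOURCE B (Python) =====
-- # B: direct O(n + B) binning — bucket each x by (x - min) // bin into a count
-- # array, no sorting. Return-value equivalence only: A sorts L1 and L2 in place, B does not mutate them.
-- def compare_distr(L1, L2, bin):
--     def hist(L):
--         m = min(L)
--         f = [0] * ((max(L) - m) // bin + 1)
--         for x in L:
--             f[(x - m) // bin] += 1
--         return f
--     return hist(L1) == hist(L2)
-- ===== Notes on version B (the rewrite author's own statement) =====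
-- stated objective: faster
-- what changed: Replaces sorting both lists and the merge-style while loop with a single pass per list that buckets each element by (x - min)//bin into a preallocated count array.
import Mathlib
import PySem

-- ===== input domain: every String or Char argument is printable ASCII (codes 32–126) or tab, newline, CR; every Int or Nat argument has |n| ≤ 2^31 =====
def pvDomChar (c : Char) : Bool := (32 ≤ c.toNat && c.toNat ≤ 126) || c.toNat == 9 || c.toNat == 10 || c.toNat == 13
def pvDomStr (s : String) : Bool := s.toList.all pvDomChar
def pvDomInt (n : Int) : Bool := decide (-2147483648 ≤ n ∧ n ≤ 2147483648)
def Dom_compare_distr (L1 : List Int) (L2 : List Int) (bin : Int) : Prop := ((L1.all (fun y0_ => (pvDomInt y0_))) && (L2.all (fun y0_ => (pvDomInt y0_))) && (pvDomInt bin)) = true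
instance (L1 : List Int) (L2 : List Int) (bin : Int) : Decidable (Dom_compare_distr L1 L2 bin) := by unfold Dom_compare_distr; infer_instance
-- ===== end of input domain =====

-- B replaces A's sort + merge-style while loop with one direct bucketing pass per list
-- ((x - min) // bin into a preallocated count array). Return-value equivalence only:
-- A sorts L1 and L2 in place, B does not mutate its arguments.

-- ===== PORT A =====
-- A's while loop; the fuel argument only totalises it (for bin ≤ 0 the Python loop
-- never terminates — excluded by Pre_ — and under Pre_ the supplied fuel is enough).
def pvLoopA (bin : Int) : Nat → List Int → Nat → Int → List Int → Nat → List Int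
  | 0, _, _, _, f, _ => f
  | fuel+1, L, i, j, f, k =>
    if h : i < L.length then
      if j ≤ L[i] ∧ L[i] < j + bin then
        pvLoopA bin fuel L (i+1) j (f.modify k (· + 1)) k
      else
        pvLoopA bin fuel L i (j + bin) (f ++ [0]) (k+1)
    else f

-- enough fuel under Pre_: one step per processed element plus one per appended bin, plus the exit test
def pvFuel (S : List Int) (bin : Int) : Nat :=
  S.length + (S.getLastD 0 - S.headD 0).toNat / bin.toNat + 1

def compare_distr (L1 : List Int) (L2 : List Int) (bin : Int) : Bool :=
  match PySem.List.sorted L1 (fun x => x) false, PySem.List.sorted L2 (fun x => x) false with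
  | x1 :: t1, x2 :: t2 =>
    (pvLoopA bin (pvFuel (x1 :: t1) bin) (x1 :: t1) 0 x1 [0] 0)
      == (pvLoopA bin (pvFuel (x2 :: t2) bin) (x2 :: t2) 0 x2 [0] 0)
  | _, _ => false  -- Python raises IndexError on an empty list (outside Pre_)

-- ===== PORT B =====
def pvHistB (L : List Int) (bin : Int) : List Int :=
  match PySem.List.min? L (fun x => x), PySem.List.max? L (fun x => x) with
  | some m, some M =>
    L.foldl
      (fun f x =>
        PySem.List.pySetD f (PySem.Int.floordiv (x - m) bin)
          (PySem.List.pyGetD f (PySem.Int.floordiv (x - m) bin) 0 + 1))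
      (List.replicate (PySem.Int.floordiv (M - m) bin + 1).toNat 0)
  | _, _ => []  -- Python's min/max raise ValueError on an empty list (outside Pre_)

def compare_distr_alt (L1 : List Int) (L2 : List Int) (bin : Int) : Bool :=
  pvHistB L1 bin == pvHistB L2 bin

-- ===== PRECONDITION & SPEC =====
-- Pre_ excludes exactly the inputs on which A does not return: an empty L1 or L2
-- (L1[0]/L2[0] raises IndexError) and bin ≤ 0 (A's while loop never terminates).
def Pre_compare_distr (L1 : List Int) (L2 : List Int) (bin : Int) : Prop :=
  L1 ≠ [] ∧ L2 ≠ [] ∧ 0 < bin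
instance (L1 : List Int) (L2 : List Int) (bin : Int) : Decidable (Pre_compare_distr L1 L2 bin) := by unfold Pre_compare_distr; infer_instance

def pvWitness_compare_distr : List Int × List Int × Int := ([1, 3, 2], [3, 1, 2], 2)

def Spec_compare_distr (L1 : List Int) (L2 : List Int) (bin : Int) (out : Bool) : Prop := out = compare_distr_alt L1 L2 bin
instance (L1 : List Int) (L2 : List Int) (bin : Int) (out : Bool) : Decidable (Spec_compare_distr L1 L2 bin out) := by unfold Spec_compare_distr; infer_instance

-- ===== CLAIM (what is proved, stated in full; the proofs are below) =====
def Claim_equal_compare_distr : Prop := ∀ (L1 : List Int) (L2 : List Int) (bin : Int), Dom_compare_distr L1 L2 bin → Pre_compare_distr L1 L2 bin → Spec_compare_distr L1 L2 bin (compare_distr L1 L2 bin)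

-- ===== LEMMAS AND PROOFS =====

-- the bin index of x relative to base m
def pvIdx (bin m x : Int) : Int := PySem.Int.floordiv (x - m) bin

-- the canonical histogram both programs compute
def pvTarget (bin m M : Int) (L : List Int) : List Int :=
  (List.range (PySem.Int.floordiv (M - m) bin + 1).toNat).map
    (fun (t : Nat) => ((L.countP (fun x => pvIdx bin m x == (t : Int))) : Int))

-- in a ≤-sorted list every element is bounded by the last one
theorem pvLe_getLast : ∀ (S : List Int), S.Pairwise (· ≤ ·) →
    ∀ (M : Int), S.getLast? = some M → ∀ y ∈ S, y ≤ M := by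
  intro S
  induction S with
  | nil => intro _ M h; simp at h
  | cons a S ih =>
    intro hp M hlast y hy
    rcases List.pairwise_cons.mp hp with ⟨ha, hp'⟩
    cases S with
    | nil =>
      simp at hlast hy
      omega
    | cons b S' =>
      rw [List.getLast?_cons_cons] at hlast
      rcases List.mem_cons.mp hy with h | h
      · exact h ▸ ha M (List.mem_of_getLast? hlast)
      · exact ih hp' M hlast y h

-- B's bucketing fold, characterised pointwise
theorem pvFoldB (bin m : Int) :
    ∀ (L f : List Int),
      (∀ x ∈ L, 0 ≤ pvIdx bin m x ∧ (pvIdx bin m x).toNat < f.length) →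
      (L.foldl (fun f x =>
          PySem.List.pySetD f (pvIdx bin m x)
            (PySem.List.pyGetD f (pvIdx bin m x) 0 + 1)) f).length = f.length ∧
      ∀ t : Nat, (L.foldl (fun f x =>
          PySem.List.pySetD f (pvIdx bin m x)
            (PySem.List.pyGetD f (pvIdx bin m x) 0 + 1)) f).getD t 0
        = f.getD t 0 + ((L.countP fun x => pvIdx bin m x == (t : Int)) : Int) := by
  intro L
  induction L with
  | nil => intro f _; simp
  | cons x L ih =>
    intro f h
    have hx := h x (by simp)
    have hstep : PySem.List.pySetD f (pvIdx bin m x)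
        (PySem.List.pyGetD f (pvIdx bin m x) 0 + 1)
        = f.set (pvIdx bin m x).toNat (f.getD (pvIdx bin m x).toNat 0 + 1) := by
      rw [PySem.List.pySetD_of_nonneg _ _ hx.1, PySem.List.pyGetD_of_nonneg _ _ hx.1]
    simp only [List.foldl_cons]
    rw [hstep]
    have hlen : (f.set (pvIdx bin m x).toNat (f.getD (pvIdx bin m x).toNat 0 + 1)).length
        = f.length := List.length_set
    obtain ⟨ih1, ih2⟩ := ih (f.set (pvIdx bin m x).toNat (f.getD (pvIdx bin m x).toNat 0 + 1))
      (fun y hy => by rw [hlen]; exact h y (by simp [hy]))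
    constructor
    · rw [ih1, hlen]
    · intro t
      rw [ih2 t, List.countP_cons]
      have hcast : pvIdx bin m x = ((pvIdx bin m x).toNat : Int) :=
        (Int.toNat_of_nonneg hx.1).symm
      have hset : (f.set (pvIdx bin m x).toNat (f.getD (pvIdx bin m x).toNat 0 + 1)).getD t 0
          = if (pvIdx bin m x).toNat = t then f.getD (pvIdx bin m x).toNat 0 + 1
            else f.getD t 0 := by
        rw [List.getD_eq_getElem?_getD, List.getElem?_set]
        by_cases hnt : (pvIdx bin m x).toNat = t
        · subst hnt; simp [hx.2]
        · simp [hnt, List.getD_eq_getElem?_getD]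
      rw [hset]
      by_cases hnt : (pvIdx bin m x).toNat = t
      · subst hnt
        rw [if_pos rfl]
        have hb : (pvIdx bin m x == ((pvIdx bin m x).toNat : Int)) = true := by
          simp [← hcast]
        rw [hb]
        simp only [if_true]
        push_cast
        ring
      · rw [if_neg hnt]
        have hb : (pvIdx bin m x == (t : Int)) = false := by
          rw [hcast]
          simp only [beq_eq_false_iff_ne, ne_eq, Nat.cast_inj]
          exact hnt
        rw [hb]
        simp

-- the loop invariant of A's while loop on a sorted list
theorem pvLoopA_inv (bin m M : Int) (hbin : 0 < bin) (S : List Int)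
    (hpair : S.Pairwise (· ≤ ·)) (hlast : S.getLast? = some M)
    (hub : ∀ x ∈ S, x ≤ M) :
    ∀ (fuel : Nat), ∀ (i k : Nat) (j : Int) (f : List Int),
      i ≤ S.length →
      j = m + (k : Int) * bin →
      f = (List.range (k+1)).map
            (fun (t : Nat) => (((S.take i).countP (fun x => pvIdx bin m x == (t : Int))) : Int)) →
      (∀ x ∈ S.drop i, j ≤ x) →
      (∀ x ∈ S.take i, x < j + bin) →
      (i = S.length → (k : Int) = PySem.Int.floordiv (M - m) bin) →
      (S.length - i) + (PySem.Int.floordiv (M - m) bin - (k : Int)).toNat + 1 ≤ fuel →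
      pvLoopA bin fuel S i j f k = pvTarget bin m M S := by
  intro fuel
  induction fuel with
  | zero => intro i k j f _ _ _ _ _ _ hfuel; omega
  | succ fuel ih =>
    intro i k j f hin hj hf hdrop htake hend hfuel
    by_cases hi : i < S.length
    · have hxmem : S[i] ∈ S.drop i := by
        rw [← List.getElem_cons_drop hi]; exact List.mem_cons_self ..
      have hxj : j ≤ S[i] := hdrop _ hxmem
      have hxM : S[i] ≤ M := hub _ (List.getElem_mem hi)
      have hkb : ((k : Int) + 1) * bin = (k : Int) * bin + bin := by ring
      by_cases hc : j ≤ S[i] ∧ S[i] < j + bin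
      · -- count into the current bin and advance i
        have hidx : pvIdx bin m S[i] = (k : Int) := by
          unfold pvIdx
          rw [PySem.Int.floordiv_eq_iff_of_pos hbin]
          constructor
          · linarith [hc.1]
          · rw [hkb]; linarith [hc.2]
        have hstep : pvLoopA bin (fuel+1) S i j f k
            = pvLoopA bin fuel S (i+1) j (f.modify k (· + 1)) k := by
          simp only [pvLoopA]; rw [dif_pos hi, if_pos hc]
        rw [hstep]
        have htk : S.take (i+1) = S.take i ++ [S[i]] := by
          rw [List.take_add_one, List.getElem?_eq_getElem hi]; rfl
        refine ih (i+1) k j _ (by omega) hj ?_ ?_ ?_ ?_ (by omega)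
        · rw [hf]
          simp only [htk]
          apply List.ext_getElem
          · simp
          · intro u h1 h2
            simp only [List.getElem_modify, List.getElem_map, List.getElem_range,
              List.countP_append]
            have hsing : List.countP (fun x => pvIdx bin m x == ((u : Nat) : Int)) [S[i]]
                = if k = u then 1 else 0 := by
              simp [List.countP_cons, hidx, Nat.cast_inj]
            rw [hsing]
            by_cases huk : k = u
            · rw [if_pos huk, if_pos huk]
              push_cast
              ring
            · rw [if_neg huk, if_neg huk]
              simp
        · intro y hy
          exact hdrop y (by rw [← List.getElem_cons_drop hi]; exact List.mem_cons_of_mem _ hy)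
        · intro y hy
          rw [htk] at hy
          rcases List.mem_append.mp hy with h | h
          · exact htake y h
          · rw [List.mem_singleton] at h
            exact h ▸ hc.2
        · intro hlen
          have h1 := hlast
          rw [List.getLast?_eq_getElem?] at h1
          have h2 : S.length - 1 = i := by omega
          rw [h2, List.getElem?_eq_getElem hi] at h1
          have hx : S[i] = M := Option.some.inj h1
          have hidx' := hidx
          unfold pvIdx at hidx'
          rw [hx] at hidx'
          exact hidx'.symm
      · -- open the next (possibly empty) bin
        have hxlb : j + bin ≤ S[i] := by
          rcases not_and_or.mp hc with h | h
          · exact absurd hxj h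
          · omega
        have hk1 : (k : Int) + 1 ≤ PySem.Int.floordiv (S[i] - m) bin := by
          rw [PySem.Int.le_floordiv_iff_mul_le hbin, hkb]
          linarith
        have hle : PySem.Int.floordiv (S[i] - m) bin ≤ PySem.Int.floordiv (M - m) bin := by
          rw [PySem.Int.floordiv_eq_ediv_of_pos hbin, PySem.Int.floordiv_eq_ediv_of_pos hbin]
          exact Int.ediv_le_ediv hbin (by omega)
        have hkK : (k : Int) + 1 ≤ PySem.Int.floordiv (M - m) bin := le_trans hk1 hle
        have hstep : pvLoopA bin (fuel+1) S i j f k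
            = pvLoopA bin fuel S i (j + bin) (f ++ [0]) (k+1) := by
          simp only [pvLoopA]; rw [dif_pos hi, if_neg hc]
        rw [hstep]
        refine ih i (k+1) (j + bin) _ hin ?_ ?_ ?_ ?_ ?_ (by push_cast; omega)
        · push_cast
          rw [hj]
          ring
        · rw [hf]
          have hr : List.range (k+1+1) = List.range (k+1) ++ [k+1] := List.range_succ
          rw [hr, List.map_append]
          congr 1
          simp only [List.map_cons, List.map_nil]
          have hz : List.countP (fun x => pvIdx bin m x == ((k : Int) + 1)) (S.take i)
              = 0 := by
            rw [List.countP_eq_zero]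
            intro y hy
            have hylt : y < j + bin := htake y hy
            simp only [beq_iff_eq]
            intro hEq
            simp only [pvIdx] at hEq
            have hge := ((PySem.Int.floordiv_eq_iff_of_pos hbin).mp hEq).1
            rw [hkb] at hge
            have : j = m + (k : Int) * bin := hj
            linarith
          simp [hz]
        · intro y hy
          have hdi : S.drop i = S[i] :: S.drop (i+1) := (List.getElem_cons_drop hi).symm
          rw [hdi] at hy
          rcases List.mem_cons.mp hy with h | h
          · exact h ▸ hxlb
          · have hpd := List.Pairwise.sublist (List.drop_sublist i S) hpair
            rw [hdi] at hpd
            have hxle : S[i] ≤ y := (List.pairwise_cons.mp hpd).1 y h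
            omega
        · intro y hy
          have := htake y hy
          linarith
        · intro hlen
          omega
    · -- loop exit: i = length, the histogram is complete
      have hieq : i = S.length := by omega
      have hkK : (k : Int) = PySem.Int.floordiv (M - m) bin := hend hieq
      have hstep : pvLoopA bin (fuel+1) S i j f k = f := by
        simp only [pvLoopA]; rw [dif_neg hi]
      rw [hstep, hf, hieq, List.take_length]
      unfold pvTarget
      have hk1 : (PySem.Int.floordiv (M - m) bin + 1).toNat = k + 1 := by omega
      rw [hk1]

-- B's histogram equals the canonical one
theorem pvHistB_eq_target (bin m M : Int) (hbin : 0 < bin) (L : List Int)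
    (hmin : PySem.List.min? L (fun x => x) = some m)
    (hmax : PySem.List.max? L (fun x => x) = some M) :
    pvHistB L bin = pvTarget bin m M L := by
  have hmM : m ≤ M := PySem.List.max?_isMax hmax _ (PySem.List.min?_mem hmin)
  have hcond : ∀ x ∈ L, 0 ≤ pvIdx bin m x ∧
      (pvIdx bin m x).toNat
        < (List.replicate (PySem.Int.floordiv (M - m) bin + 1).toNat (0 : Int)).length := by
    intro x hxL
    have hxm : m ≤ x := PySem.List.min?_isMin hmin x hxL
    have hxM : x ≤ M := PySem.List.max?_isMax hmax x hxL
    have h0 : 0 ≤ pvIdx bin m x := by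
      unfold pvIdx
      rw [PySem.Int.floordiv_eq_ediv_of_pos hbin]
      exact Int.ediv_nonneg (by omega) (by omega)
    have hle : pvIdx bin m x ≤ PySem.Int.floordiv (M - m) bin := by
      unfold pvIdx
      rw [PySem.Int.floordiv_eq_ediv_of_pos hbin, PySem.Int.floordiv_eq_ediv_of_pos hbin]
      exact Int.ediv_le_ediv hbin (by omega)
    refine ⟨h0, ?_⟩
    rw [List.length_replicate]
    omega
  obtain ⟨h1, h2⟩ := pvFoldB bin m L
    (List.replicate (PySem.Int.floordiv (M - m) bin + 1).toNat (0 : Int)) hcond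
  simp only [pvIdx] at h1 h2
  simp only [pvHistB, hmin, hmax]
  apply List.ext_getElem
  · rw [h1]
    simp [pvTarget]
  · intro u hu1 hu2
    have hulen : u < (PySem.Int.floordiv (M - m) bin + 1).toNat := by
      simpa [pvTarget] using hu2
    rw [← List.getD_eq_getElem _ 0 hu1, h2 u]
    have hrep : (List.replicate (PySem.Int.floordiv (M - m) bin + 1).toNat (0 : Int)).getD u 0
        = 0 := by
      by_cases h : u < (PySem.Int.floordiv (M - m) bin + 1).toNat <;>
        simp [List.getD_eq_getElem?_getD, h]
    rw [hrep, zero_add]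
    simp [pvTarget, pvIdx]

-- A's per-list computation equals B's
theorem pvA_side (bin : Int) (hbin : 0 < bin) (L : List Int) (x : Int) (t : List Int)
    (hs : PySem.List.sorted L (fun y => y) false = x :: t) :
    pvLoopA bin (pvFuel (x :: t) bin) (x :: t) 0 x [0] 0 = pvHistB L bin := by
  have hperm : (x :: t).Perm L := hs ▸ PySem.List.sorted_perm L (fun y => y) false
  have hpair : (x :: t).Pairwise (· ≤ ·) := by
    have h := PySem.List.sorted_pairwise L (fun y => y)
    rw [hs] at h
    exact h
  have hlast : (x :: t).getLast? = some ((x :: t).getLastD 0) := by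
    cases h : (x :: t).getLast? with
    | none => rw [List.getLast?_eq_none_iff] at h; simp at h
    | some a => rw [List.getLastD_eq_getLast?, h]; rfl
  have hub : ∀ y ∈ (x :: t), y ≤ (x :: t).getLastD 0 :=
    pvLe_getLast (x :: t) hpair _ hlast
  have hheadle : ∀ y ∈ (x :: t), x ≤ y := by
    intro y hy
    rcases List.mem_cons.mp hy with h | h
    · exact le_of_eq h.symm
    · exact (List.pairwise_cons.mp hpair).1 y h
  have hminL : PySem.List.min? L (fun y => y) = some x := by
    cases hm : PySem.List.min? L (fun y => y) with
    | none =>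
      rw [PySem.List.min?_eq_none_iff] at hm
      exfalso
      have := (PySem.List.sorted_eq_nil_iff L (fun y => y) false).mpr hm
      rw [hs] at this
      simp at this
    | some m' =>
      have h1 : m' ≤ x := PySem.List.min?_isMin hm x (hperm.mem_iff.mp (by simp))
      have h2 : x ≤ m' := PySem.List.key_head_sorted_le L (fun y => y) hs m' (PySem.List.min?_mem hm)
      exact congrArg some (le_antisymm h1 h2)
  have hmaxL : PySem.List.max? L (fun y => y) = some ((x :: t).getLastD 0) := by
    cases hm : PySem.List.max? L (fun y => y) with
    | none =>
      rw [PySem.List.max?_eq_none_iff] at hm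
      exfalso
      have := (PySem.List.sorted_eq_nil_iff L (fun y => y) false).mpr hm
      rw [hs] at this
      simp at this
    | some M' =>
      have h1 : M' ≤ (x :: t).getLastD 0 := hub M' (hperm.mem_iff.mpr (PySem.List.max?_mem hm))
      have h2 : (x :: t).getLastD 0 ≤ M' :=
        PySem.List.max?_isMax hm _ (hperm.mem_iff.mp (List.mem_of_getLast? hlast))
      exact congrArg some (le_antisymm h1 h2)
  rw [pvHistB_eq_target bin x ((x :: t).getLastD 0) hbin L hminL hmaxL]
  have htLS : pvTarget bin x ((x :: t).getLastD 0) L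
      = pvTarget bin x ((x :: t).getLastD 0) (x :: t) := by
    unfold pvTarget
    congr 1
    funext u
    rw [List.Perm.countP_eq _ hperm]
  rw [htLS]
  have hxM : x ≤ (x :: t).getLastD 0 := hub x (by simp)
  have hK0 : 0 ≤ PySem.Int.floordiv ((x :: t).getLastD 0 - x) bin := by
    rw [PySem.Int.floordiv_eq_ediv_of_pos hbin]
    exact Int.ediv_nonneg (by omega) (by omega)
  have hKb : PySem.Int.floordiv ((x :: t).getLastD 0 - x) bin * bin ≤ (x :: t).getLastD 0 - x :=
    ((PySem.Int.floordiv_eq_iff_of_pos hbin).mp rfl).1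
  have hb' : 0 < bin.toNat := by omega
  have hcast : ((PySem.Int.floordiv ((x :: t).getLastD 0 - x) bin).toNat * bin.toNat : Int)
      ≤ (((x :: t).getLastD 0 - x).toNat : Int) := by
    push_cast [Int.toNat_of_nonneg hK0, Int.toNat_of_nonneg (le_of_lt hbin),
      Int.toNat_of_nonneg (by omega : (0 : Int) ≤ (x :: t).getLastD 0 - x)]
    exact hKb
  have hnat : (PySem.Int.floordiv ((x :: t).getLastD 0 - x) bin).toNat * bin.toNat
      ≤ ((x :: t).getLastD 0 - x).toNat := by exact_mod_cast hcast
  have hdiv := (Nat.le_div_iff_mul_le hb').mpr hnat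
  apply pvLoopA_inv bin x ((x :: t).getLastD 0) hbin (x :: t) hpair hlast hub
    (pvFuel (x :: t) bin) 0 0 x [0] (by omega) (by simp) (by simp) ?_ (by simp) ?_ ?_
  · intro y hy
    rw [List.drop_zero] at hy
    exact hheadle y hy
  · intro h0
    simp at h0
  · simp only [pvFuel, List.headD_cons]
    omega

-- ===== VERDICT (by name: the statement is the Claim_ definition above) =====
theorem compare_distr_spec : Claim_equal_compare_distr := by
  intro L1 L2 bin _ hpre
  obtain ⟨h1, h2, hbin⟩ := hpre
  unfold Spec_compare_distr compare_distr_alt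
  obtain ⟨x1, t1, hs1⟩ : ∃ x t, PySem.List.sorted L1 (fun y => y) false = x :: t := by
    rcases hs : PySem.List.sorted L1 (fun y => y) false with _ | ⟨x, t⟩
    · exact absurd ((PySem.List.sorted_eq_nil_iff L1 (fun y => y) false).mp hs) h1
    · exact ⟨x, t, rfl⟩
  obtain ⟨x2, t2, hs2⟩ : ∃ x t, PySem.List.sorted L2 (fun y => y) false = x :: t := by
    rcases hs : PySem.List.sorted L2 (fun y => y) false with _ | ⟨x, t⟩
    · exact absurd ((PySem.List.sorted_eq_nil_iff L2 (fun y => y) false).mp hs) h2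
    · exact ⟨x, t, rfl⟩
  unfold compare_distr
  rw [hs1, hs2]
  show (pvLoopA bin (pvFuel (x1 :: t1) bin) (x1 :: t1) 0 x1 [0] 0
      == pvLoopA bin (pvFuel (x2 :: t2) bin) (x2 :: t2) 0 x2 [0] 0)
    = (pvHistB L1 bin == pvHistB L2 bin)
  rw [pvA_side bin hbin L1 x1 t1 hs1, pvA_side bin hbin L2 x2 t2 hs2]
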